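-- pv_equiv track=rewrite | github.com/LCEMocha/codetree-TILs | 240516/카드 사이클 만들기/create-card-cycle.py | find_cycles_and_max_cycle_size
-- ===== SOURCE A (Python) =====
-- def find_cycles_and_max_cycle_size(n, initial, target):
--     # Create a mapping from initial to target positions
--     position_map = {initial[i]: target[i] for i in range(n)}
--
--     visited = [False] * (n + 1)
--     cycle_count = 0
--     max_cycle_size = 0
--
--     # Function to perform DFS and return the size of the cycle
--     def dfs(node):
--         cycle_size = 0
--         current = node
--         while not visited[current]:
--             visited[current] = True
--             current = position_map[current]
--             cycle_size += 1
--         return cycle_size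
--
--     # Traverse through each element to find all cycles
--     for i in range(1, n + 1):
--         if not visited[i]:
--             cycle_size = dfs(i)
--             if cycle_size > 0:
--                 cycle_count += 1
--                 max_cycle_size = max(max_cycle_size, cycle_size)
--
--     return cycle_count, max_cycle_size
-- ===== SOURCE B (Python) =====
-- def find_cycles_and_max_cycle_size(n, initial, target):
--     position_map = {initial[i]: target[i] for i in range(n)}
--     cycle_count = 0
--     max_cycle_size = 0
--     # For each node, walk its own cycle statelessly, tracking the cycle's
--     # size and minimum; count the cycle only at its minimal element.
--     for v in range(1, n + 1):
--         size = 1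
--         lo = v
--         cur = position_map[v]
--         while cur != v:
--             if cur < lo:
--                 lo = cur
--             size += 1
--             cur = position_map[cur]
--         if lo == v:
--             cycle_count += 1
--             if size > max_cycle_size:
--                 max_cycle_size = size
--     return cycle_count, max_cycle_size
-- ===== Notes on version B (the rewrite author's own statement) =====
-- stated objective: alternative
-- what changed: Replaces the shared visited-array DFS sweep with a stateless per-node orbit walk: for every node v it follows the permutation until it returns to v, tracking the cycle's size and minimum, and counts/measures the cycle exactly at its minimal element, so the mutable visited list disappears entirely.
-- outside the precondition, e.g. on find_cycles_and_max_cycle_size(1, [1], [-1]): A returns (1, 1), B raises KeyError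
import Mathlib
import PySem

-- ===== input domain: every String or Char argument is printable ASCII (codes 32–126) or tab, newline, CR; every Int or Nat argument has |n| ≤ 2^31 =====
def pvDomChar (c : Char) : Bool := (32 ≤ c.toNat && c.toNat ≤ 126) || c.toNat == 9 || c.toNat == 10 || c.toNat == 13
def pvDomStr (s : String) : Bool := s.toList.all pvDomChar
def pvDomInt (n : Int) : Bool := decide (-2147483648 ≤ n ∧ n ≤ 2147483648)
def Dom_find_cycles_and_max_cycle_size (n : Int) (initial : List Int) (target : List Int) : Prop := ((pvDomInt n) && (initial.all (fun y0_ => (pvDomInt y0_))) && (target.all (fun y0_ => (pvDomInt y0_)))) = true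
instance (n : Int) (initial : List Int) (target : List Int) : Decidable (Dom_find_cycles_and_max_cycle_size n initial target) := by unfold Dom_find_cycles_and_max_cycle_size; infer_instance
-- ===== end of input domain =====

-- B is an ALTERNATIVE re-implementation (stateless per-node orbit walk instead of a
-- visited-array DFS sweep); equal return value on all permutation inputs (Pre_), not faster.

-- ===== PORT A =====
-- {initial[i]: target[i] for i in range(n)} — duplicate keys overwrite in place, as in Python;
-- index reads use a default, exact wherever the indices are in range (always under Pre_).
def pvPosMap (n : Int) (initial target : List Int) : PySem.Dict Int Int :=
  (PySem.List.pyRange 0 n 1).foldl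
    (fun d i => d.insert (PySem.List.pyGetD initial i 0) (PySem.List.pyGetD target i 0))
    PySem.Dict.empty

-- the inner `while not visited[current]` loop of dfs; fuel bounds the iterations (each
-- iteration marks a fresh cell, so n+1 fuel is enough under Pre_).  Out-of-range reads
-- default to True (stop) and missing dict keys default to 0: Python raises there, and
-- all such inputs are outside Pre_.
def pvDfsA (pm : PySem.Dict Int Int) : Nat → List Bool → Int → Int → Int × List Bool
  | 0, visited, _, size => (size, visited)
  | fuel+1, visited, current, size =>
    if PySem.List.pyGetD visited current true = false then
      pvDfsA pm fuel (PySem.List.pySetD visited current true) (pm.getD current 0) (size + 1)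
    else (size, visited)

-- loop body of `for i in range(1, n + 1)`
def pvStepA (pm : PySem.Dict Int Int) (n : Int) (st : List Bool × Int × Int) (i : Int) :
    List Bool × Int × Int :=
  if PySem.List.pyGetD st.1 i true = false then
    let r := pvDfsA pm (n.toNat + 1) st.1 i 0
    if r.1 > 0 then (r.2, st.2.1 + 1, max st.2.2 r.1)
    else (r.2, st.2.1, st.2.2)
  else st

def find_cycles_and_max_cycle_size (n : Int) (initial : List Int) (target : List Int) : Int × Int :=
  let pm := pvPosMap n initial target
  let st := (PySem.List.pyRange 1 (n+1) 1).foldl (pvStepA pm n)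
      (List.replicate (n+1).toNat false, 0, 0)
  (st.2.1, st.2.2)

-- ===== PORT B =====
-- the `while cur != v` walk of B; fuel bounds the iterations (the cycle through v has at
-- most n nodes under Pre_); a missing dict key defaults to 0 where Python raises (outside Pre_).
def pvWalkB (pm : PySem.Dict Int Int) (v : Int) : Nat → Int → Int → Int → Int × Int
  | 0, _, size, lo => (size, lo)
  | fuel+1, cur, size, lo =>
    if cur ≠ v then
      pvWalkB pm v fuel (pm.getD cur 0) (size + 1) (if cur < lo then cur else lo)
    else (size, lo)

-- loop body of B's `for v in range(1, n + 1)`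
def pvStepB (pm : PySem.Dict Int Int) (n : Int) (st : Int × Int) (v : Int) : Int × Int :=
  let r := pvWalkB pm v n.toNat (pm.getD v 0) 1 v
  if r.2 = v then (st.1 + 1, if r.1 > st.2 then r.1 else st.2) else st

def find_cycles_and_max_cycle_size_alt (n : Int) (initial : List Int) (target : List Int) : Int × Int :=
  let pm := pvPosMap n initial target
  (PySem.List.pyRange 1 (n+1) 1).foldl (pvStepB pm n) (0, 0)

-- ===== PRECONDITION & SPEC =====
-- 0 ≤ n with initial and target each listing the numbers 1..n exactly once
def pvPerm (n : Int) (initial target : List Int) : Prop :=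
  0 ≤ n ∧ initial.length = n.toNat ∧ target.length = n.toNat ∧
  initial.Nodup ∧ target.Nodup ∧
  (∀ x ∈ initial, 1 ≤ x ∧ x ≤ n) ∧ (∀ x ∈ target, 1 ≤ x ∧ x ≤ n)

-- Pre_ admits every n ≤ 0 (all loops are empty: both programs return (0, 0) without
-- touching the lists) and, for 0 ≤ n, genuine permutation data: initial and target each
-- list 1..n exactly once.  Outside it A raises KeyError/IndexError, except on a few
-- inputs where A still returns via Python's accidental negative-index wraparound in
-- `visited[current]` (an artefact of the implementation) while B raises KeyError.
def Pre_find_cycles_and_max_cycle_size (n : Int) (initial : List Int) (target : List Int) : Prop :=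
  n ≤ 0 ∨ pvPerm n initial target
instance (n : Int) (initial : List Int) (target : List Int) :
    Decidable (Pre_find_cycles_and_max_cycle_size n initial target) := by
  unfold Pre_find_cycles_and_max_cycle_size pvPerm; infer_instance

def pvWitness_find_cycles_and_max_cycle_size : Int × List Int × List Int := (3, [2, 1, 3], [3, 1, 2])

def Spec_find_cycles_and_max_cycle_size (n : Int) (initial : List Int) (target : List Int) (out : Int × Int) : Prop := out = find_cycles_and_max_cycle_size_alt n initial target
instance (n : Int) (initial : List Int) (target : List Int) (out : Int × Int) : Decidable (Spec_find_cycles_and_max_cycle_size n initial target out) := by unfold Spec_find_cycles_and_max_cycle_size; infer_instance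

-- ===== CLAIM (what is proved, stated in full; the proofs are below) =====
def Claim_equal_find_cycles_and_max_cycle_size : Prop := ∀ (n : Int) (initial : List Int) (target : List Int), Dom_find_cycles_and_max_cycle_size n initial target → Pre_find_cycles_and_max_cycle_size n initial target → Spec_find_cycles_and_max_cycle_size n initial target (find_cycles_and_max_cycle_size n initial target)

-- ===== LEMMAS AND PROOFS =====

-- `f` is a good permutation-like map on {1..n}
def pvGood (f : Int → Int) (n : Int) : Prop :=
  (∀ x, 1 ≤ x → x ≤ n → 1 ≤ f x ∧ f x ≤ n) ∧
  (∀ x y, 1 ≤ x → x ≤ n → 1 ≤ y → y ≤ n → f x = f y → x = y)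

lemma pvIterMem {f : Int → Int} {n : Int} (hg : pvGood f n) (k : Nat) {v : Int}
    (hv : 1 ≤ v ∧ v ≤ n) : 1 ≤ f^[k] v ∧ f^[k] v ≤ n := by
  induction k with
  | zero => simpa using hv
  | succ k ih => rw [Function.iterate_succ_apply']; exact hg.1 _ ih.1 ih.2

lemma pvIterCancel {f : Int → Int} {n : Int} (hg : pvGood f n) (k : Nat) {a b : Int}
    (ha : 1 ≤ a ∧ a ≤ n) (hb : 1 ≤ b ∧ b ≤ n) (h : f^[k] a = f^[k] b) : a = b := by
  induction k with
  | zero => simpa using h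
  | succ k ih =>
      apply ih
      rw [Function.iterate_succ_apply', Function.iterate_succ_apply'] at h
      exact hg.2 _ _ (pvIterMem hg k ha).1 (pvIterMem hg k ha).2
        (pvIterMem hg k hb).1 (pvIterMem hg k hb).2 h

lemma pvExistsReturn {f : Int → Int} {n : Int} (hg : pvGood f n) {v : Int}
    (hv : 1 ≤ v ∧ v ≤ n) : ∃ m : Nat, m + 1 ≤ n.toNat ∧ f^[m+1] v = v := by
  have hcard : (Finset.Icc 1 n).card < (Finset.range (n.toNat + 1)).card := by
    rw [Int.card_Icc, Finset.card_range]; omega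
  obtain ⟨a, _, b, _, hab, heq⟩ :=
    Finset.exists_ne_map_eq_of_card_lt_of_maps_to hcard
      (f := fun k => f^[k] v)
      (fun k _ => Finset.mem_Icc.mpr (pvIterMem hg k hv))
  rcases lt_or_gt_of_ne hab with hlt | hlt
  · have hsplit : f^[a] (f^[b-a] v) = f^[a] v := by
      rw [← Function.iterate_add_apply]
      rw [show a + (b - a) = b by omega]; exact heq.symm
    have := pvIterCancel hg a (pvIterMem hg (b-a) hv) hv hsplit
    refine ⟨b - a - 1, ?_, ?_⟩
    · have : b < n.toNat + 1 := Finset.mem_range.mp ‹b ∈ Finset.range (n.toNat + 1)›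
      omega
    · rw [show b - a - 1 + 1 = b - a by omega]; exact this
  · have hsplit : f^[b] (f^[a-b] v) = f^[b] v := by
      rw [← Function.iterate_add_apply]
      rw [show b + (a - b) = a by omega]; exact heq
    have := pvIterCancel hg b (pvIterMem hg (a-b) hv) hv hsplit
    refine ⟨a - b - 1, ?_, ?_⟩
    · have : a < n.toNat + 1 := Finset.mem_range.mp ‹a ∈ Finset.range (n.toNat + 1)›
      omega
    · rw [show a - b - 1 + 1 = a - b by omega]; exact this

lemma pvHex {f : Int → Int} {n : Int} (hg : pvGood f n) {v : Int}
    (hv : 1 ≤ v ∧ v ≤ n) : ∃ m : Nat, f^[m+1] v = v := by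
  obtain ⟨m, _, h⟩ := pvExistsReturn hg hv; exact ⟨m, h⟩

-- return time (cycle length) of v
def pvT (f : Int → Int) (v : Int) (h : ∃ m : Nat, f^[m+1] v = v) : Nat :=
  Nat.find h + 1

lemma pvT_pos {f : Int → Int} {v : Int} (h : ∃ m : Nat, f^[m+1] v = v) : 0 < pvT f v h :=
  Nat.succ_pos _

lemma pvT_ret {f : Int → Int} {v : Int} (h : ∃ m : Nat, f^[m+1] v = v) :
    f^[pvT f v h] v = v := Nat.find_spec h

lemma pvT_min {f : Int → Int} {v : Int} (h : ∃ m : Nat, f^[m+1] v = v) {j : Nat}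
    (h1 : 0 < j) (h2 : j < pvT f v h) : f^[j] v ≠ v := by
  have := Nat.find_min h (m := j - 1) (by unfold pvT at h2; omega)
  intro hc; apply this
  have : j - 1 + 1 = j := by omega
  rw [this]; exact hc

lemma pvT_le {f : Int → Int} {n : Int} (hg : pvGood f n) {v : Int}
    (hv : 1 ≤ v ∧ v ≤ n) (h : ∃ m : Nat, f^[m+1] v = v) : pvT f v h ≤ n.toNat := by
  obtain ⟨m, hm, hret⟩ := pvExistsReturn hg hv
  have : Nat.find h ≤ m := Nat.find_min' h hret
  unfold pvT; omega

lemma pvIterMod {f : Int → Int} {v : Int} (h : ∃ m : Nat, f^[m+1] v = v) (k : Nat) :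
    f^[k] v = f^[k % pvT f v h] v :=
  (Function.IsPeriodicPt.iterate_mod_apply (pvT_ret h) k).symm

lemma pvIterNe {f : Int → Int} {n : Int} (hg : pvGood f n) {v : Int}
    (hv : 1 ≤ v ∧ v ≤ n) (hex : ∃ m : Nat, f^[m+1] v = v) {i j : Nat}
    (hij : i < j) (hj : j < pvT f v hex) : f^[i] v ≠ f^[j] v := by
  intro h
  have hsplit : f^[i] (f^[j-i] v) = f^[i] v := by
    rw [← Function.iterate_add_apply, show i + (j-i) = j by omega]; exact h.symm
  have := pvIterCancel hg i (pvIterMem hg (j-i) hv) hv hsplit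
  exact pvT_min hex (j := j - i) (by omega) (by omega) this

-- x lies on the cycle through w (bounded witness keeps it closed-form in proofs)
def pvSameOrb (f : Int → Int) (n : Int) (w x : Int) : Prop :=
  ∃ k : Nat, k ≤ n.toNat ∧ f^[k] w = x

lemma pvSameOrb_refl (f : Int → Int) (n : Int) (w : Int) : pvSameOrb f n w w :=
  ⟨0, Nat.zero_le _, rfl⟩

lemma pvSameOrb_iter {f : Int → Int} {n : Int} (hg : pvGood f n) {v : Int}
    (hv : 1 ≤ v ∧ v ≤ n) (k : Nat) : pvSameOrb f n v (f^[k] v) := by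
  have hex := pvHex hg hv
  refine ⟨k % pvT f v hex, ?_, (pvIterMod hex k).symm⟩
  have h1 := Nat.mod_lt k (pvT_pos hex)
  have h2 := pvT_le hg hv hex
  omega

lemma pvSameOrb_symm {f : Int → Int} {n : Int} (hg : pvGood f n) {v x : Int}
    (hv : 1 ≤ v ∧ v ≤ n) (h : pvSameOrb f n v x) : pvSameOrb f n x v := by
  obtain ⟨k, hkN, hkx⟩ := h
  have hex := pvHex hg hv
  have hT := pvT_le hg hv hex
  have hTpos := pvT_pos hex
  have hr : f^[k % pvT f v hex] v = x := by rw [← pvIterMod hex k]; exact hkx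
  rcases Nat.eq_zero_or_pos (k % pvT f v hex) with h0 | h0
  · rw [h0] at hr; simp at hr; exact hr ▸ pvSameOrb_refl f n v
  · refine ⟨pvT f v hex - k % pvT f v hex, by omega, ?_⟩
    rw [← hr, ← Function.iterate_add_apply]
    rw [show pvT f v hex - k % pvT f v hex + k % pvT f v hex = pvT f v hex by
      have := Nat.mod_lt k hTpos; omega]
    exact pvT_ret hex

lemma pvSameOrb_trans {f : Int → Int} {n : Int} (hg : pvGood f n) {w x y : Int}
    (hw : 1 ≤ w ∧ w ≤ n) (h1 : pvSameOrb f n w x) (h2 : pvSameOrb f n x y) :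
    pvSameOrb f n w y := by
  obtain ⟨k, hkN, hkx⟩ := h1
  obtain ⟨l, hlN, hly⟩ := h2
  have hex := pvHex hg hw
  have hT := pvT_le hg hw hex
  have hTpos := pvT_pos hex
  refine ⟨(l + k) % pvT f w hex, by have := Nat.mod_lt (l + k) hTpos; omega, ?_⟩
  rw [← pvIterMod hex (l + k), Function.iterate_add_apply, hkx, hly]

-- ----- the running-minimum fold of B's walk -----

def pvFoldMin (lo : Int) (l : List Int) : Int :=
  l.foldl (fun lo c => if c < lo then c else lo) lo

lemma pvFoldMin_le_init (lo : Int) (l : List Int) : pvFoldMin lo l ≤ lo := by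
  induction l generalizing lo with
  | nil => simp [pvFoldMin]
  | cons c l ih =>
      simp only [pvFoldMin, List.foldl_cons]
      by_cases hlt : c < lo
      · rw [if_pos hlt]; have := ih c; simp only [pvFoldMin] at this; omega
      · rw [if_neg hlt]; have := ih lo; simp only [pvFoldMin] at this; omega

lemma pvFoldMin_le_mem {lo c : Int} {l : List Int} (h : c ∈ l) : pvFoldMin lo l ≤ c := by
  induction l generalizing lo with
  | nil => simp at h
  | cons c' l ih =>
      simp only [pvFoldMin, List.foldl_cons]
      rcases List.mem_cons.mp h with rfl | hc
      · by_cases hlt : c < lo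
        · simpa [pvFoldMin, hlt] using pvFoldMin_le_init c l
        · rw [if_neg hlt]
          have := pvFoldMin_le_init lo l
          simp only [pvFoldMin] at this
          omega
      · exact ih hc

lemma pvFoldMin_eq_of_ge {lo : Int} {l : List Int} (h : ∀ c ∈ l, lo ≤ c) :
    pvFoldMin lo l = lo := by
  induction l with
  | nil => rfl
  | cons c l ih =>
      have hc := h c (List.mem_cons_self ..)
      simp only [pvFoldMin, List.foldl_cons]
      rw [if_neg (by omega)]
      exact ih (fun c hcl => h c (List.mem_cons_of_mem _ hcl))

-- ----- characterisation of B's walk -----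

lemma pvWalkB_spec (pm : PySem.Dict Int Int) {v : Int}
    (hex : ∃ m : Nat, (fun x => pm.getD x 0)^[m+1] v = v) :
    ∀ (m j : Nat), 1 ≤ j → j + m = pvT (fun x => pm.getD x 0) v hex →
    ∀ (fuel : Nat), m ≤ fuel → ∀ lo : Int,
    pvWalkB pm v fuel ((fun x => pm.getD x 0)^[j] v) (j : Int) lo =
      ((pvT (fun x => pm.getD x 0) v hex : Int),
       pvFoldMin lo ((List.range' j m).map (fun k => (fun x => pm.getD x 0)^[k] v))) := by
  intro m
  induction m with
  | zero =>
      intro j hj1 hjT fuel hfuel lo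
      have hj : j = pvT (fun x => pm.getD x 0) v hex := by omega
      have hcur : (fun x => pm.getD x 0)^[j] v = v := by rw [hj]; exact pvT_ret hex
      cases fuel with
      | zero => simp [pvWalkB, pvFoldMin, hj]
      | succ fu => rw [hcur]; simp [pvWalkB, pvFoldMin, hj]
  | succ m ih =>
      intro j hj1 hjT fuel hfuel lo
      have hne : (fun x => pm.getD x 0)^[j] v ≠ v := pvT_min hex (by omega) (by omega)
      cases fuel with
      | zero => omega
      | succ fu =>
          simp only [pvWalkB, if_pos hne]
          have h1 : pm.getD ((fun x => pm.getD x 0)^[j] v) 0 = (fun x => pm.getD x 0)^[j+1] v :=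
            (Function.iterate_succ_apply' (fun x => pm.getD x 0) j v).symm
          have h2 : ((j : Int) + 1) = ((j + 1 : Nat) : Int) := by push_cast; ring
          rw [h1, h2, ih (j+1) (by omega) (by omega) fu (by omega)]
          rw [List.range'_succ, List.map_cons]
          simp [pvFoldMin]

-- ----- the visited list abstraction -----

def pvVisOK (n : Int) (visited : List Bool) (M : Int → Prop) : Prop :=
  visited.length = (n+1).toNat ∧
  ∀ x : Int, 0 ≤ x → x ≤ n → (PySem.List.pyGetD visited x true = true ↔ M x)

lemma pvVisOK_congr {n : Int} {visited : List Bool} {M M' : Int → Prop}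
    (h : ∀ x, M x ↔ M' x) (hv : pvVisOK n visited M) : pvVisOK n visited M' :=
  ⟨hv.1, fun x h0 h1 => (hv.2 x h0 h1).trans (h x)⟩

lemma pvVisOK_set {n : Int} {visited : List Bool} {M : Int → Prop} {c : Int}
    (hv : pvVisOK n visited M) (h0 : 0 ≤ c) (h1 : c ≤ n) :
    pvVisOK n (PySem.List.pySetD visited c true) (fun x => x = c ∨ M x) := by
  obtain ⟨hlen, hget⟩ := hv
  rw [PySem.List.pySetD_of_nonneg visited true h0]
  refine ⟨by simpa using hlen, fun x hx0 hxn => ?_⟩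
  have hxlt : x.toNat < visited.length := by omega
  have hclt : c.toNat < visited.length := by omega
  rw [PySem.List.pyGetD_eq_getElem _ true hx0 (by simp; omega)]
  rw [List.getElem_set]
  by_cases hxc : x = c
  · rw [if_pos (by omega)]; simp [hxc]
  · rw [if_neg (by omega)]
    rw [← PySem.List.pyGetD_eq_getElem visited true hx0 (by omega)]
    rw [hget x hx0 hxn]
    simp [hxc]

lemma pvVisOK_init {n : Int} (_hn : 0 ≤ n) :
    pvVisOK n (List.replicate (n+1).toNat false) (fun _ => False) := by
  refine ⟨by simp, fun x hx0 hxn => ?_⟩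
  rw [PySem.List.pyGetD_eq_getElem _ true hx0 (by simp; omega)]
  simp

-- ----- characterisation of A's dfs -----

lemma pvDfsA_spec (pm : PySem.Dict Int Int) {n : Int}
    (hg : pvGood (fun x => pm.getD x 0) n) {v : Int} (hv : 1 ≤ v ∧ v ≤ n)
    (hex : ∃ m : Nat, (fun x => pm.getD x 0)^[m+1] v = v)
    {M : Int → Prop} (hM : ∀ k, k < pvT (fun x => pm.getD x 0) v hex → ¬ M ((fun x => pm.getD x 0)^[k] v)) :
    ∀ (m j : Nat), j + m = pvT (fun x => pm.getD x 0) v hex →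
    ∀ (fuel : Nat), m ≤ fuel → ∀ visited : List Bool,
    pvVisOK n visited (fun x => M x ∨ ∃ k, k < j ∧ (fun x => pm.getD x 0)^[k] v = x) →
    ∃ visited',
      pvDfsA pm fuel visited ((fun x => pm.getD x 0)^[j] v) (j : Int) =
        ((pvT (fun x => pm.getD x 0) v hex : Int), visited') ∧
      pvVisOK n visited' (fun x => M x ∨ ∃ k, k < pvT (fun x => pm.getD x 0) v hex ∧ (fun x => pm.getD x 0)^[k] v = x) := by
  intro m
  induction m with
  | zero =>
      intro j hjT fuel hfuel visited hvis
      have hj : j = pvT (fun x => pm.getD x 0) v hex := by omega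
      refine ⟨visited, ?_, pvVisOK_congr (fun x => by rw [hj]) hvis⟩
      cases fuel with
      | zero => simp [pvDfsA, hj]
      | succ fu =>
          have hb := (hvis.2 ((fun x => pm.getD x 0)^[j] v)
            (by have := pvIterMem hg j hv; omega) (by have := pvIterMem hg j hv; omega)).mpr
            (Or.inr ⟨0, by have := pvT_pos hex; omega, by
              rw [Function.iterate_zero_apply, hj, pvT_ret hex]⟩)
          rw [hj] at hb
          rw [hj]
          simp [pvDfsA, hb]
  | succ m ih =>
      intro j hjT fuel hfuel visited hvis
      have hjlt : j < pvT (fun x => pm.getD x 0) v hex := by omega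
      have hbmem := pvIterMem hg j hv
      have hval : PySem.List.pyGetD visited ((fun x => pm.getD x 0)^[j] v) true = false := by
        cases hval' : PySem.List.pyGetD visited ((fun x => pm.getD x 0)^[j] v) true with
        | false => rfl
        | true =>
            rcases (hvis.2 _ (by omega) (by omega)).mp hval' with hMj | ⟨k, hk, hkj⟩
            · exact absurd hMj (hM j hjlt)
            · exact absurd hkj (pvIterNe hg hv hex (by omega) hjlt)
      cases fuel with
      | zero => omega
      | succ fu =>
          simp only [pvDfsA, hval, if_pos]
          have h1 : pm.getD ((fun x => pm.getD x 0)^[j] v) 0 = (fun x => pm.getD x 0)^[j+1] v :=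
            (Function.iterate_succ_apply' (fun x => pm.getD x 0) j v).symm
          have h2 : ((j : Int) + 1) = ((j + 1 : Nat) : Int) := by push_cast; ring
          rw [h1, h2]
          refine ih (j+1) (by omega) fu (by omega) _ ?_
          refine pvVisOK_congr (fun x => ?_) (pvVisOK_set hvis (by omega) (by omega))
          constructor
          · rintro (rfl | hMx | ⟨k, hk, hkx⟩)
            · exact Or.inr ⟨j, by omega, rfl⟩
            · exact Or.inl hMx
            · exact Or.inr ⟨k, by omega, hkx⟩
          · rintro (hMx | ⟨k, hk, hkx⟩)
            · exact Or.inr (Or.inl hMx)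
            · rcases Nat.lt_or_ge k j with hkj | hkj
              · exact Or.inr (Or.inr ⟨k, hkj, hkx⟩)
              · exact Or.inl (by rw [← hkx, show k = j by omega])

-- ----- the outer loops -----

-- everything marked after the loop has processed 1..a-1
def pvMarked (f : Int → Int) (n a x : Int) : Prop :=
  ∃ w, 1 ≤ w ∧ w < a ∧ pvSameOrb f n w x

lemma pvOuter (pm : PySem.Dict Int Int) {n : Int}
    (hg : pvGood (fun x => pm.getD x 0) n) :
    ∀ (m : Nat) (a : Int), 1 ≤ a → a + m = n + 1 →
    ∀ (visited : List Bool) (cc mx : Int),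
    pvVisOK n visited (pvMarked (fun x => pm.getD x 0) n a) →
    ((PySem.List.pyRange a (n+1) 1).foldl (pvStepA pm n) (visited, cc, mx)).2 =
      (PySem.List.pyRange a (n+1) 1).foldl (pvStepB pm n) (cc, mx) := by
  intro m
  induction m with
  | zero =>
      intro a ha1 ham visited cc mx _hvis
      rw [PySem.List.pyRange_one_eq_nil (by omega)]
      rfl
  | succ m ih =>
      intro a ha1 ham visited cc mx hvis
      have ha2 : a ≤ n := by omega
      have hva : 1 ≤ a ∧ a ≤ n := ⟨ha1, ha2⟩
      have hex := pvHex hg hva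
      have hT1 : 0 < pvT (fun x => pm.getD x 0) a hex := pvT_pos hex
      have hTle : pvT (fun x => pm.getD x 0) a hex ≤ n.toNat := pvT_le hg hva hex
      rw [PySem.List.pyRange_one_cons (by omega : a < n+1)]
      simp only [List.foldl_cons]
      have hwalk := pvWalkB_spec pm hex
        (pvT (fun x => pm.getD x 0) a hex - 1) 1 (by omega) (by omega) n.toNat (by omega) a
      have hcur1 : (fun x => pm.getD x 0)^[1] a = pm.getD a 0 := Function.iterate_one _ ▸ rfl
      rw [hcur1, Nat.cast_one] at hwalk
      by_cases hMa : pvMarked (fun x => pm.getD x 0) n a a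
      · -- a already visited: both sides skip
        have hAcond : PySem.List.pyGetD visited a true = true :=
          (hvis.2 a (by omega) ha2).mpr hMa
        have hstepA : pvStepA pm n (visited, cc, mx) a = (visited, cc, mx) := by
          simp only [pvStepA]
          rw [if_neg (by simp [hAcond])]
        obtain ⟨w, hw1, hw2, hwo⟩ := hMa
        obtain ⟨k, hkN, hka⟩ := pvSameOrb_symm hg ⟨hw1, by omega⟩ hwo
        have hmod : (fun x => pm.getD x 0)^[k % pvT (fun x => pm.getD x 0) a hex] a = w := by
          rw [← pvIterMod hex k]; exact hka
        have hkm : k % pvT (fun x => pm.getD x 0) a hex ≠ 0 := by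
          intro h0; rw [h0] at hmod; simp at hmod; omega
        have hwmem : w ∈ (List.range' 1 (pvT (fun x => pm.getD x 0) a hex - 1)).map
            (fun k => (fun x => pm.getD x 0)^[k] a) := by
          refine List.mem_map.mpr ⟨k % pvT (fun x => pm.getD x 0) a hex, ?_, hmod⟩
          rw [List.mem_range']
          have := Nat.mod_lt k hT1
          exact ⟨k % pvT (fun x => pm.getD x 0) a hex - 1, by omega, by omega⟩
        have hlt := pvFoldMin_le_mem (lo := a) hwmem
        have hstepB : pvStepB pm n (cc, mx) a = (cc, mx) := by
          simp only [pvStepB, hwalk]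
          rw [if_neg (by omega)]
        rw [hstepA, hstepB]
        refine ih (a+1) (by omega) (by omega) visited cc mx ?_
        refine pvVisOK_congr (fun x => ?_) hvis
        constructor
        · rintro ⟨w', h1, h2, h3⟩; exact ⟨w', h1, by omega, h3⟩
        · rintro ⟨w', h1, h2, h3⟩
          rcases Int.lt_or_le w' a with hlt' | hge'
          · exact ⟨w', h1, hlt', h3⟩
          · have hw'a : w' = a := by omega
            subst hw'a
            exact ⟨w, hw1, hw2, pvSameOrb_trans hg ⟨hw1, by omega⟩ hwo h3⟩
      · -- a starts a fresh cycle: A runs dfs, B counts the minimum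
        have hAcond : PySem.List.pyGetD visited a true = false := by
          cases hval' : PySem.List.pyGetD visited a true with
          | false => rfl
          | true => exact absurd ((hvis.2 a (by omega) ha2).mp hval') hMa
        have hM' : ∀ k, k < pvT (fun x => pm.getD x 0) a hex →
            ¬ pvMarked (fun x => pm.getD x 0) n a ((fun x => pm.getD x 0)^[k] a) := by
          intro k _hk hcon
          obtain ⟨w, hw1, hw2, hwo⟩ := hcon
          have h1 := pvSameOrb_iter hg hva k
          have h2 := pvSameOrb_symm hg hva h1
          exact hMa ⟨w, hw1, hw2, pvSameOrb_trans hg ⟨hw1, by omega⟩ hwo h2⟩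
        obtain ⟨visited', hdfseq, hvis'⟩ :=
          pvDfsA_spec pm hg hva hex hM' (pvT (fun x => pm.getD x 0) a hex) 0 (by omega)
            (n.toNat+1) (by omega) visited
            (pvVisOK_congr (fun x => by simp) hvis)
        rw [Function.iterate_zero_apply, Nat.cast_zero] at hdfseq
        have hstepA : pvStepA pm n (visited, cc, mx) a =
            (visited', cc + 1, max mx ((pvT (fun x => pm.getD x 0) a hex : Nat) : Int)) := by
          simp only [pvStepA]
          rw [if_pos (by simp [hAcond])]
          simp only [hdfseq]
          rw [if_pos (by exact_mod_cast hT1)]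
        have hge : ∀ c ∈ (List.range' 1 (pvT (fun x => pm.getD x 0) a hex - 1)).map
            (fun k => (fun x => pm.getD x 0)^[k] a), a ≤ c := by
          intro c hc
          obtain ⟨k, hkr, rfl⟩ := List.mem_map.mp hc
          rw [List.mem_range'] at hkr
          obtain ⟨i, hi, rfl⟩ := hkr
          by_contra hlt
          have hb := pvIterMem hg (1 + 1 * i) hva
          have h1 := pvSameOrb_iter hg hva (1 + 1 * i)
          have h2 := pvSameOrb_symm hg hva h1
          exact hMa ⟨(fun x => pm.getD x 0)^[1 + 1 * i] a, hb.1, by omega, h2⟩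
        have hstepB : pvStepB pm n (cc, mx) a =
            (cc + 1, if ((pvT (fun x => pm.getD x 0) a hex : Nat) : Int) > mx
                     then ((pvT (fun x => pm.getD x 0) a hex : Nat) : Int) else mx) := by
          simp only [pvStepB, hwalk]
          rw [pvFoldMin_eq_of_ge hge]
          rw [if_pos rfl]
        rw [hstepA, hstepB]
        have hmax : max mx ((pvT (fun x => pm.getD x 0) a hex : Nat) : Int) =
            if ((pvT (fun x => pm.getD x 0) a hex : Nat) : Int) > mx
            then ((pvT (fun x => pm.getD x 0) a hex : Nat) : Int) else mx := by
          rw [Int.max_def]; split_ifs <;> omega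
        rw [hmax]
        refine ih (a+1) (by omega) (by omega) visited' _ _ ?_
        refine pvVisOK_congr (fun x => ?_) hvis'
        constructor
        · rintro (⟨w', h1, h2, h3⟩ | ⟨k, hkT, hka⟩)
          · exact ⟨w', h1, by omega, h3⟩
          · exact ⟨a, ha1, by omega, ⟨k, by omega, hka⟩⟩
        · rintro ⟨w', h1, h2, h3⟩
          rcases Int.lt_or_le w' a with hlt' | hge'
          · exact Or.inl ⟨w', h1, hlt', h3⟩
          · obtain ⟨k, hkN, hka⟩ := (show w' = a by omega) ▸ h3
            refine Or.inr ⟨k % pvT (fun x => pm.getD x 0) a hex, Nat.mod_lt k hT1, ?_⟩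
            rw [← pvIterMod hex k]; exact hka

-- ----- deriving pvGood from Pre_ -----

lemma pvPermCovers {n : Int} {l : List Int} (hlen : l.length = n.toNat) (hnd : l.Nodup)
    (hmem : ∀ x ∈ l, 1 ≤ x ∧ x ≤ n) : ∀ x : Int, 1 ≤ x → x ≤ n → x ∈ l := by
  have hsub : l.toFinset ⊆ Finset.Icc 1 n := by
    intro x hx
    exact Finset.mem_Icc.mpr (hmem x (List.mem_toFinset.mp hx))
  have hcard : (Finset.Icc 1 n).card ≤ l.toFinset.card := by
    rw [Int.card_Icc, List.toFinset_card_of_nodup hnd, hlen]; omega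
  have heq := Finset.eq_of_subset_of_card_le hsub hcard
  intro x hx1 hxn
  have : x ∈ l.toFinset := heq ▸ Finset.mem_Icc.mpr ⟨hx1, hxn⟩
  exact List.mem_toFinset.mp this

lemma pvPosMap_eq (n : Int) (initial target : List Int) :
    pvPosMap n initial target = (List.range n.toNat).foldl
      (fun d k => d.insert (initial.getD k 0) (target.getD k 0)) PySem.Dict.empty := by
  unfold pvPosMap
  rw [PySem.List.pyRange_one 0 n, List.foldl_map]
  simp

lemma pvBuild_get {initial target : List Int} (hnd : initial.Nodup) :
    ∀ (m : Nat), m ≤ initial.length → ∀ (d : PySem.Dict Int Int) (k : Nat), k < m →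
    ((List.range m).foldl (fun d k => d.insert (initial.getD k 0) (target.getD k 0)) d).get?
      (initial.getD k 0) = some (target.getD k 0) := by
  intro m
  induction m with
  | zero => intro _ _ k hk; omega
  | succ m ih =>
      intro hm d k hk
      rw [List.range_succ, List.foldl_append, List.foldl_cons, List.foldl_nil]
      by_cases hkm : k = m
      · subst hkm
        exact PySem.Dict.get?_insert_self _ _ _
      · have hne : initial.getD k 0 ≠ initial.getD m 0 := by
          rw [List.getD_eq_getElem _ _ (by omega), List.getD_eq_getElem _ _ (by omega)]
          intro h
          exact hkm ((List.Nodup.getElem_inj_iff hnd).mp h)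
        rw [PySem.Dict.get?_insert_of_ne _ _ hne]
        exact ih (by omega) d k (by omega)

lemma pvPosMap_get {n : Int} {initial target : List Int}
    (hpre : pvPerm n initial target)
    {k : Nat} (hk : k < initial.length) :
    (pvPosMap n initial target).get? initial[k] = some (target.getD k 0) := by
  obtain ⟨hn, hleni, hlent, hndi, _, _, _⟩ := hpre
  rw [pvPosMap_eq]
  have h := pvBuild_get (target := target) hndi n.toNat (by omega) PySem.Dict.empty k (by omega)
  rw [List.getD_eq_getElem _ _ hk] at h
  exact h

lemma pvGood_of_pre {n : Int} {initial target : List Int}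
    (hpre : pvPerm n initial target) :
    pvGood (fun x => (pvPosMap n initial target).getD x 0) n := by
  obtain ⟨hn, hleni, hlent, hndi, hndt, hmi, hmt⟩ := hpre
  have hget : ∀ x, 1 ≤ x → x ≤ n → ∃ (k : Nat) (hklt : k < initial.length),
      initial[k] = x ∧
      (pvPosMap n initial target).getD x 0 = target.getD k 0 := by
    intro x h1 h2
    have hx := pvPermCovers hleni hndi hmi x h1 h2
    obtain ⟨k, hk, hkx⟩ := List.mem_iff_getElem.mp hx
    refine ⟨k, hk, hkx, ?_⟩ 
    have := pvPosMap_get ⟨hn, hleni, hlent, hndi, hndt, hmi, hmt⟩ hk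
    rw [hkx] at this
    show ((pvPosMap n initial target).get? x).getD 0 = _
    rw [this]
    rfl
  constructor
  · intro x h1 h2
    obtain ⟨k, hk, hkx, hval⟩ := hget x h1 h2
    show 1 ≤ (pvPosMap n initial target).getD x 0 ∧ (pvPosMap n initial target).getD x 0 ≤ n
    rw [hval, List.getD_eq_getElem _ _ (by omega : k < target.length)]
    exact hmt _ (List.getElem_mem _)
  · intro x y hx1 hx2 hy1 hy2 heq
    obtain ⟨k, hk, hkx, hvx⟩ := hget x hx1 hx2
    obtain ⟨l, hl, hly, hvy⟩ := hget y hy1 hy2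
    simp only [] at heq
    rw [hvx, hvy, List.getD_eq_getElem _ _ (by omega : k < target.length),
      List.getD_eq_getElem _ _ (by omega : l < target.length)] at heq
    have hkl : k = l := (List.Nodup.getElem_inj_iff hndt).mp heq
    subst hkl
    rw [← hkx, ← hly]

-- ===== VERDICT (by name: the statement is the Claim_ definition above) =====
theorem find_cycles_and_max_cycle_size_spec : Claim_equal_find_cycles_and_max_cycle_size := by
  intro n initial target _hdom hpre0
  unfold Spec_find_cycles_and_max_cycle_size
  rcases hpre0 with hneg | hpre
  · -- n ≤ 0: every loop is empty on both sides
    simp only [find_cycles_and_max_cycle_size, find_cycles_and_max_cycle_size_alt]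
    rw [PySem.List.pyRange_one_eq_nil (by omega : n + 1 ≤ 1)]
    rfl
  have hn : 0 ≤ n := hpre.1
  have hg := pvGood_of_pre hpre
  have hinit : pvVisOK n (List.replicate (n+1).toNat false)
      (pvMarked (fun x => (pvPosMap n initial target).getD x 0) n 1) := by
    refine pvVisOK_congr (fun x => ?_) (pvVisOK_init hn)
    constructor
    · intro h; exact h.elim
    · rintro ⟨w, hw1, hw2, -⟩; omega
  have h := pvOuter (pvPosMap n initial target) hg n.toNat 1 (by omega) (by omega)
    (List.replicate (n+1).toNat false) 0 0 hinit
  simp only [find_cycles_and_max_cycle_size, find_cycles_and_max_cycle_size_alt]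
  rw [← h]
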